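-- pv_equiv track=rewrite | github.com/cirosantilli/project-euler-solvers | solvers/438.py | poly_from_forward_differences
-- ===== SOURCE A (Python) =====
-- from math import factorial, gcd
--
-- def poly_trim(p):
--     i = 0
--     while i < len(p) and p[i] == 0:
--         i += 1
--     return p[i:] if i < len(p) else [0]
--
-- def poly_add_int(a, b):
--     a = poly_trim(a)
--     b = poly_trim(b)
--     if len(a) < len(b):
--         a = [0] * (len(b) - len(a)) + a
--     elif len(b) < len(a):
--         b = [0] * (len(a) - len(b)) + b
--     return poly_trim([x + y for x, y in zip(a, b)])
--
-- def poly_mul_int(a, b):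
--     a = poly_trim(a)
--     b = poly_trim(b)
--     if a == [0] or b == [0]:
--         return [0]
--     res = [0] * (len(a) + len(b) - 1)
--     for i, ca in enumerate(a):
--         for j, cb in enumerate(b):
--             res[i + j] += ca * cb
--     return poly_trim(res)
--
-- def poly_from_forward_differences(n, b_list):
--     """
--     b_list holds b_m = Δ^m p(1) for m=0..n-1, with Δ^n p(1)=n! (monic).
--     Build p(x) in the standard power basis (descending integer coeff list).
--     """
--     fact = [factorial(i) for i in range(n + 1)]
--
--     # c_m = b_m / m! must be integer; c_n = 1
--     c = [0] * (n + 1)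
--     for m in range(n):
--         c[m] = b_list[m] // fact[m]
--     c[n] = 1
--
--     # basis[m] = Π_{t=1..m} (x - t) in power basis
--     basis = [[1]]
--     for m in range(1, n + 1):
--         basis.append(poly_mul_int(basis[-1], [1, -m]))
--
--     poly = [0]
--     for m in range(n + 1):
--         if c[m] == 0:
--             continue
--         term = [coef * c[m] for coef in basis[m]]
--         poly = poly_add_int(poly, term)
--
--     poly = poly_trim(poly)
--     if len(poly) < n + 1:
--         poly = [0] * (n + 1 - len(poly)) + poly
--     return poly
-- ===== SOURCE B (Python) =====
-- def poly_from_forward_differences(n, b_list):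
--     """Horner evaluation of the Newton form: no basis table, no polynomial
--     trim/add/mul helpers; nest p = c_0 + (x-1)(c_1 + (x-2)(... + (x-n)*1))."""
--     c = []
--     f = 1
--     for m in range(n):
--         c.append(b_list[m] // f)
--         f *= m + 1
--     acc = [1]  # descending coefficients, starts as c_n = 1
--     for m in reversed(range(n)):
--         t = m + 1
--         # acc = acc * (x - t), descending coefficients
--         acc = [x - t * y for x, y in zip(acc + [0], [0] + acc)]
--         acc[-1] += c[m]
--     return acc
-- ===== Notes on version B (the rewrite author's own statement) =====
-- stated objective: alternative
-- what changed: A constructs the whole table of falling-factorial basis polynomials by repeated polynomial multiplication and then sums scaled copies of them with trim/pad polynomial-addition helpers; B never forms any basis polynomial: it evaluates the Newton form by Horner's nested scheme, folding from the highest coefficient down with a single accumulator (acc = acc*(x-(m+1)) + c_m), so no basis table, no polynomial add/mul/trim helpers exist in B.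
import Mathlib
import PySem

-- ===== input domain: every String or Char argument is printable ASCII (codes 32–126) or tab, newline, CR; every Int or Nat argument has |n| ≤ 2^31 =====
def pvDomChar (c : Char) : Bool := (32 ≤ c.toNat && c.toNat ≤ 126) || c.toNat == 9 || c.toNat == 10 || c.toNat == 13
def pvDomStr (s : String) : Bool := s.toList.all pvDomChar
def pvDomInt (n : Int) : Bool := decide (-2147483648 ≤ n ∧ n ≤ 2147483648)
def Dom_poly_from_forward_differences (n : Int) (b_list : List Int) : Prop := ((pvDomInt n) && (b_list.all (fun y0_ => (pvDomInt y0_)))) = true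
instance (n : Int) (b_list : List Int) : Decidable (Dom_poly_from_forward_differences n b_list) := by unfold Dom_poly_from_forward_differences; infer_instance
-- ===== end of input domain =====

-- B replaces A's basis-polynomial table and trim/pad/multiply polynomial helpers by Horner's nested
-- evaluation of the Newton form with a single accumulator (same O(n^2) cost, a different algorithm).

-- ===== PORT A =====
-- math.factorial(i) for i ≥ 0 (the only way A calls it)
def pyFactorial (i : Int) : Int := (Nat.factorial i.toNat : Int)

def polyTrim : List Int → List Int
  | [] => [0]
  | a :: t => if a = 0 then polyTrim t else a :: t

def polyAddInt (a0 b0 : List Int) : List Int :=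
  let a := polyTrim a0
  let b := polyTrim b0
  let a' := if a.length < b.length then List.replicate (b.length - a.length) (0 : Int) ++ a else a
  let b' := if b.length < a'.length then List.replicate (a'.length - b.length) (0 : Int) ++ b else b
  polyTrim (List.zipWith (· + ·) a' b')

def polyMulInt (a0 b0 : List Int) : List Int :=
  let a := polyTrim a0
  let b := polyTrim b0
  if a = [0] ∨ b = [0] then [0]
  else
    let res : List Int := List.replicate (a.length + b.length - 1) 0
    let res := (PySem.List.enumerate a 0).foldl (fun res p =>
      (PySem.List.enumerate b 0).foldl (fun res q =>
        PySem.List.pySetD res (p.1 + q.1) (PySem.List.pyGetD res (p.1 + q.1) 0 + p.2 * q.2)) res) res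
    polyTrim res

def poly_from_forward_differences (n : Int) (b_list : List Int) : List Int :=
  let fact := (PySem.List.pyRange 0 (n + 1) 1).map (fun i => pyFactorial i)
  let c : List Int := List.replicate (n + 1).toNat 0
  let c := (PySem.List.pyRange 0 n 1).foldl
    (fun c m => PySem.List.pySetD c m
      (PySem.Int.floordiv (PySem.List.pyGetD b_list m 0) (PySem.List.pyGetD fact m 0))) c
  let c := PySem.List.pySetD c n 1
  let basis := (PySem.List.pyRange 1 (n + 1) 1).foldl
    (fun bs m => bs ++ [polyMulInt (PySem.List.pyGetD bs (-1) []) [1, -m]]) [[(1 : Int)]]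
  let poly := (PySem.List.pyRange 0 (n + 1) 1).foldl
    (fun poly m =>
      if PySem.List.pyGetD c m 0 = 0 then poly
      else polyAddInt poly ((PySem.List.pyGetD basis m []).map (fun coef => coef * PySem.List.pyGetD c m 0)))
    [0]
  let poly := polyTrim poly
  if (poly.length : Int) < n + 1 then List.replicate (n + 1 - (poly.length : Int)).toNat 0 ++ poly
  else poly

-- ===== PORT B =====
def poly_from_forward_differences_alt (n : Int) (b_list : List Int) : List Int :=
  -- c.append(b_list[m] // f); f *= m + 1
  let s := (PySem.List.pyRange 0 n 1).foldl
    (fun (s : List Int × Int) m =>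
      (s.1 ++ [PySem.Int.floordiv (PySem.List.pyGetD b_list m 0) s.2], s.2 * (m + 1)))
    ([], 1)
  let c := s.1
  -- Horner: acc = acc*(x-t) then acc[-1] += c[m], for m = n-1 .. 0
  (PySem.List.pyRange 0 n 1).reverse.foldl
    (fun acc m =>
      let t := m + 1
      let acc := List.zipWith (fun x y => x - t * y) (acc ++ [0]) (0 :: acc)
      PySem.List.pySetD acc (-1) (PySem.List.pyGetD acc (-1) 0 + PySem.List.pyGetD c m 0))
    [1]

-- ===== PRECONDITION & SPEC =====
-- Pre_: A raises IndexError when n < 0 (c[n] on an empty list) or n > len(b_list) (b_list[m]).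
def Pre_poly_from_forward_differences (n : Int) (b_list : List Int) : Prop :=
  0 ≤ n ∧ n ≤ (b_list.length : Int)
instance (n : Int) (b_list : List Int) : Decidable (Pre_poly_from_forward_differences n b_list) := by
  unfold Pre_poly_from_forward_differences; infer_instance

def pvWitness_poly_from_forward_differences : Int × List Int := (2, [6, 0])

def Spec_poly_from_forward_differences (n : Int) (b_list : List Int) (out : List Int) : Prop := out = poly_from_forward_differences_alt n b_list
instance (n : Int) (b_list : List Int) (out : List Int) : Decidable (Spec_poly_from_forward_differences n b_list out) := by unfold Spec_poly_from_forward_differences; infer_instance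

-- ===== CLAIM (what is proved, stated in full; the proofs are below) =====
def Claim_equal_poly_from_forward_differences : Prop := ∀ (n : Int) (b_list : List Int), Dom_poly_from_forward_differences n b_list → Pre_poly_from_forward_differences n b_list → Spec_poly_from_forward_differences n b_list (poly_from_forward_differences n b_list)

-- ===== LEMMAS AND PROOFS =====

-- ---- reused convolution lemmas characterising A's polyMulInt on monic linear factors ----

lemma polyTrim_cons_ne {a : Int} (t : List Int) (h : a ≠ 0) : polyTrim (a :: t) = a :: t := by
  simp [polyTrim, h]

def convSpec (t carry : Int) : List Int → List Int
  | [] => [carry]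
  | x :: xs => (carry + x * 1) :: convSpec t (0 + x * -t) xs

lemma mulFold (t : Int) (a : List Int) : ∀ (pre : List Int) (carry : Int),
    (PySem.List.enumerate a (pre.length : Int)).foldl (fun res p =>
      (PySem.List.enumerate [1, -t] 0).foldl (fun res q =>
        PySem.List.pySetD res (p.1 + q.1) (PySem.List.pyGetD res (p.1 + q.1) 0 + p.2 * q.2)) res)
      (pre ++ carry :: List.replicate a.length 0)
    = pre ++ convSpec t carry a := by
  induction a with
  | nil => intro pre carry; simp [PySem.List.enumerate_nil, convSpec]
  | cons x xs ih =>
    intro pre carry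
    have e1 : PySem.List.enumerate (x :: xs) ((pre.length : Nat) : Int)
        = (((pre.length : Nat) : Int), x) :: PySem.List.enumerate xs ((pre.length : Int) + 1) :=
      PySem.List.enumerate_cons x xs _
    rw [e1, List.foldl_cons]
    have h1 : (PySem.List.enumerate [1, -t] 0).foldl (fun res q =>
        PySem.List.pySetD res ((pre.length : Int) + q.1) (PySem.List.pyGetD res ((pre.length : Int) + q.1) 0 + x * q.2)) (pre ++ carry :: List.replicate (x :: xs).length 0)
        = (pre ++ [carry + x * 1]) ++ (0 + x * -t) :: List.replicate xs.length 0 := by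
      simp only [PySem.List.enumerate_cons, PySem.List.enumerate_nil, List.foldl_cons, List.foldl_nil]
      norm_num
      rw [show ((pre.length : Int) + 1) = ((pre.length + 1 : Nat) : Int) by push_cast; ring]
      simp only [PySem.List.pySetD_natCast, PySem.List.pyGetD_natCast]
      rw [List.replicate_succ]
      simp [List.getD]
    rw [h1]
    have h2 : ((pre.length : Int) + 1) = (((pre ++ [carry + x * 1]).length : Nat) : Int) := by
      simp
    rw [h2, ih]
    simp [convSpec]

lemma convSpec_zipWith (t : Int) (a : List Int) : ∀ y : Int,
    convSpec t (0 + y * -t) a = List.zipWith (fun x z => x - t * z) (a ++ [0]) (y :: a) := by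
  induction a with
  | nil => intro y; simp [convSpec]; ring
  | cons x xs ih =>
    intro y
    simp only [convSpec, List.cons_append, List.zipWith_cons_cons, ih]
    simp only [List.cons.injEq, and_true]
    ring

lemma convSpec_zero (t : Int) (a : List Int) :
    convSpec t 0 a = List.zipWith (fun x z => x - t * z) (a ++ [0]) (0 :: a) := by
  have := convSpec_zipWith t a 0
  simpa using this

lemma polyMulInt_monic (rest : List Int) (t : Int) :
    polyMulInt (1 :: rest) [1, -t]
    = List.zipWith (fun x y => x - t * y) ((1 :: rest) ++ [0]) (0 :: 1 :: rest) := by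
  have htrim1 : polyTrim (1 :: rest) = 1 :: rest := polyTrim_cons_ne rest one_ne_zero
  have htrim2 : polyTrim [1, -t] = [1, -t] := polyTrim_cons_ne [-t] one_ne_zero
  have hne1 : ¬ ((1 : Int) :: rest = [0] ∨ ([1, -t] : List Int) = [0]) := by
    simp
  unfold polyMulInt
  simp only [htrim1, htrim2, if_neg hne1]
  have hlen : (1 :: rest).length + ([1, -t] : List Int).length - 1 = (1 :: rest).length + 1 := by
    simp
  rw [hlen]
  have hfold := mulFold t (1 :: rest) [] 0
  simp only [List.length_nil, Nat.cast_zero, List.nil_append] at hfold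
  rw [List.replicate_succ, hfold, convSpec_zero]
  simp only [List.cons_append, List.zipWith_cons_cons]
  have : (1 : Int) - t * 0 ≠ 0 := by simp
  rw [polyTrim_cons_ne _ this]

-- ---- the basis polynomials of A, as coefficient lists ----

def refB : Nat → List Int
  | 0 => [1]
  | m + 1 => List.zipWith (fun x y => x - ((m : Int) + 1) * y) (refB m ++ [0]) (0 :: refB m)

lemma refB_length (m : Nat) : (refB m).length = m + 1 := by
  induction m with
  | zero => rfl
  | succ m ih => simp [refB, ih]

lemma refB_cons (m : Nat) : ∃ t, refB m = 1 :: t := by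
  induction m with
  | zero => exact ⟨[], rfl⟩
  | succ m ih =>
    obtain ⟨t, ht⟩ := ih
    refine ⟨List.zipWith (fun x y => x - ((m : Int) + 1) * y) (t ++ [0]) (1 :: t), ?_⟩
    simp [refB, ht]

lemma basisFold (N : Nat) :
    (PySem.List.pyRange 1 ((N : Int) + 1) 1).foldl
      (fun bs m => bs ++ [polyMulInt (PySem.List.pyGetD bs (-1) []) [1, -m]]) [[(1 : Int)]]
    = (List.range (N + 1)).map refB := by
  induction N with
  | zero =>
    rw [PySem.List.pyRange_one_eq_nil (by norm_num)]
    simp [refB]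
  | succ N ih =>
    push_cast
    rw [PySem.List.pyRange_one_succ_right (by omega), List.foldl_append]
    rw [ih]
    rw [List.range_succ (n := N + 1), List.map_append]
    simp only [List.foldl_cons, List.foldl_nil]
    rw [show (List.range (N + 1)).map refB = (List.range N).map refB ++ [refB N] by
      rw [List.range_succ, List.map_append]; rfl]
    rw [PySem.List.pyGetD_neg_one_append_singleton]
    obtain ⟨t, ht⟩ := refB_cons N
    rw [ht, polyMulInt_monic, ← ht]
    simp only [List.map_cons, List.map_nil, List.append_assoc, List.cons_append, List.nil_append,
      List.append_cancel_left_eq]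
    have : refB (N + 1) = List.zipWith (fun x y => x - ((N : Int) + 1) * y) (refB N ++ [0]) (0 :: refB N) := rfl
    rw [this]

-- ---- A's c-array (reused) ----

lemma setFold_length (w : Nat → Int) (K : Nat) (c₀ : List Int) :
    ((List.range K).foldl (fun c m => c.set m (w m)) c₀).length = c₀.length := by
  induction K with
  | zero => rfl
  | succ K ih => rw [List.range_succ, List.foldl_append]; simp [ih]

lemma setFold_getD (w : Nat → Int) (K : Nat) (c₀ : List Int) (hk : K ≤ c₀.length) (k : Nat) :
    ((List.range K).foldl (fun c m => c.set m (w m)) c₀).getD k 0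
    = if k < K then w k else c₀.getD k 0 := by
  induction K with
  | zero => simp
  | succ K ih =>
    rw [List.range_succ, List.foldl_append]
    simp only [List.foldl_cons, List.foldl_nil]
    by_cases hkK : k = K
    · subst hkK
      rw [List.getD, List.getElem?_set_self (by rw [setFold_length]; omega)]
      simp
    · rw [List.getD, List.getElem?_set_ne (Ne.symm hkK), ← List.getD, ih (by omega)]
      by_cases h1 : k < K
      · rw [if_pos h1, if_pos (by omega)]
      · rw [if_neg h1, if_neg (by omega)]

lemma fact_getD (N k : Nat) (hk : k < N + 1) :
    ((PySem.List.pyRange 0 ((N : Int) + 1) 1).map (fun i => pyFactorial i)).getD k 0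
    = ((Nat.factorial k : Nat) : Int) := by
  have hcast : ((N : Int) + 1) = ((N + 1 : Nat) : Int) := by push_cast; ring
  rw [hcast, PySem.List.pyRange_zero_nat, List.map_map, List.getD, List.getElem?_map,
    List.getElem?_range hk]
  simp [pyFactorial]

lemma cl_spec (b_list fact : List Int) (N : Nat)
    (hfact : ∀ k : Nat, k < N + 1 → fact.getD k 0 = ((Nat.factorial k : Nat) : Int)) :
    ∀ k : Nat, k ≤ N →
    (PySem.List.pySetD ((PySem.List.pyRange 0 (N : Int) 1).foldl
        (fun c m => PySem.List.pySetD c m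
          (PySem.Int.floordiv (PySem.List.pyGetD b_list m 0) (PySem.List.pyGetD fact m 0)))
        (List.replicate ((N : Int) + 1).toNat 0)) (N : Int) 1).getD k 0
    = if k < N then PySem.Int.floordiv (b_list.getD k 0) ((Nat.factorial k : Nat) : Int) else 1 := by
  intro k hk
  have htoNat : ((N : Int) + 1).toNat = N + 1 := by omega
  rw [htoNat, PySem.List.pyRange_zero_nat, List.foldl_map]
  simp only [PySem.List.pySetD_natCast, PySem.List.pyGetD_natCast]
  set w : Nat → Int := fun m => PySem.Int.floordiv (b_list.getD m 0) (fact.getD m 0) with hw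
  by_cases hkN : k = N
  · subst hkN
    rw [List.getD, List.getElem?_set_self (by rw [setFold_length]; simp), if_neg (by omega)]
    rfl
  · rw [List.getD, List.getElem?_set_ne (Ne.symm hkN), ← List.getD,
      setFold_getD w N _ (by simp) k, if_pos (by omega), if_pos (by omega), hw]
    simp only []
    rw [hfact k (by omega)]
-- ---- evaluation of a descending coefficient list as a polynomial over ℤ ----

noncomputable def evalL (l : List Int) : Polynomial ℤ :=
  l.foldl (fun q a => q * Polynomial.X + Polynomial.C a) 0

lemma evalL_foldl (l : List Int) : ∀ q : Polynomial ℤ,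
    l.foldl (fun q a => q * Polynomial.X + Polynomial.C a) q
    = q * Polynomial.X ^ l.length + evalL l := by
  induction l with
  | nil => intro q; simp [evalL]
  | cons a t ih =>
    intro q
    have h0 : evalL (a :: t) = (0 * Polynomial.X + Polynomial.C a) * Polynomial.X ^ t.length + evalL t := by
      rw [evalL, List.foldl_cons, ih]
    simp only [List.foldl_cons, ih, h0, List.length_cons]
    ring

lemma evalL_cons (a : Int) (t : List Int) :
    evalL (a :: t) = Polynomial.C a * Polynomial.X ^ t.length + evalL t := by
  rw [evalL, List.foldl_cons, evalL_foldl]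
  ring_nf

lemma evalL_concat (l : List Int) (a : Int) :
    evalL (l ++ [a]) = evalL l * Polynomial.X + Polynomial.C a := by
  rw [evalL, List.foldl_append]
  rfl

lemma evalL_zero_cons (l : List Int) : evalL (0 :: l) = evalL l := by
  rw [evalL_cons]; simp

lemma evalL_pad (k : Nat) (l : List Int) : evalL (List.replicate k 0 ++ l) = evalL l := by
  induction k with
  | zero => simp
  | succ k ih => rw [List.replicate_succ, List.cons_append, evalL_zero_cons, ih]

lemma evalL_trim (l : List Int) : evalL (polyTrim l) = evalL l := by
  induction l with
  | nil => simp [polyTrim, evalL]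
  | cons a t ih =>
    by_cases h : a = 0
    · subst h; rw [polyTrim, if_pos rfl, ih, evalL_zero_cons]
    · rw [polyTrim_cons_ne t h]

lemma polyTrim_shape (l : List Int) :
    polyTrim l = [0] ∨ ∃ a t, polyTrim l = a :: t ∧ a ≠ 0 := by
  induction l with
  | nil => exact Or.inl rfl
  | cons a t ih =>
    by_cases h : a = 0
    · subst h; rw [polyTrim, if_pos rfl]; exact ih
    · exact Or.inr ⟨a, t, polyTrim_cons_ne t h, h⟩

lemma evalL_zipWith_lin (c : Int) : ∀ (a b : List Int), a.length = b.length →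
    evalL (List.zipWith (fun x y => x + c * y) a b)
    = evalL a + Polynomial.C c * evalL b := by
  intro a
  induction a with
  | nil =>
    intro b h
    have hb : b = [] := List.eq_nil_of_length_eq_zero (by simpa using h.symm)
    subst hb
    simp [evalL]
  | cons x xs ih =>
    intro b h
    cases b with
    | nil => simp at h
    | cons y ys =>
      have hl : xs.length = ys.length := by simpa using h
      rw [List.zipWith_cons_cons, evalL_cons, evalL_cons, evalL_cons, ih ys hl,
        List.length_zipWith, ← hl, min_self]
      simp only [map_add, map_mul]
      ring

lemma evalL_zipWith_add (a b : List Int) (h : a.length = b.length) :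
    evalL (List.zipWith (· + ·) a b) = evalL a + evalL b := by
  have hf : (fun x y : Int => x + y) = fun x y => x + (1 : Int) * y := by
    funext x y; ring
  rw [hf, evalL_zipWith_lin 1 a b h]
  simp

lemma evalL_zipWith_sub (t : Int) (a b : List Int) (h : a.length = b.length) :
    evalL (List.zipWith (fun x y => x - t * y) a b)
    = evalL a - Polynomial.C t * evalL b := by
  have hf : (fun x y : Int => x - t * y) = fun x y => x + (-t) * y := by
    funext x y; ring
  rw [hf, evalL_zipWith_lin (-t) a b h]
  simp only [map_neg]
  ring

lemma evalL_map_mulc (l : List Int) (c : Int) :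
    evalL (l.map (fun coef => coef * c)) = evalL l * Polynomial.C c := by
  induction l with
  | nil => simp [evalL]
  | cons x xs ih =>
    rw [List.map_cons, evalL_cons, evalL_cons, ih, List.length_map]
    simp only [map_mul]
    ring

lemma evalL_polyAddInt (a0 b0 : List Int) :
    evalL (polyAddInt a0 b0) = evalL a0 + evalL b0 := by
  simp only [polyAddInt]
  set a := polyTrim a0 with ha
  set b := polyTrim b0 with hb
  by_cases h1 : a.length < b.length
  · rw [if_pos h1]
    have h2 : ¬ b.length < (List.replicate (b.length - a.length) (0:Int) ++ a).length := by
      simp; omega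
    rw [if_neg h2, evalL_trim, evalL_zipWith_add _ _ (by simp; omega), evalL_pad,
      ha, hb, evalL_trim, evalL_trim]
  · rw [if_neg h1]
    by_cases h2 : b.length < a.length
    · rw [if_pos h2, evalL_trim, evalL_zipWith_add _ _ (by simp; omega), evalL_pad,
        ha, hb, evalL_trim, evalL_trim]
    · rw [if_neg h2, evalL_trim, evalL_zipWith_add _ _ (by omega),
        ha, hb, evalL_trim, evalL_trim]

lemma evalL_refB_zero : evalL (refB 0) = 1 := by
  show evalL [1] = 1
  rw [evalL_cons]
  simp [evalL]

lemma evalL_refB_succ (m : Nat) :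
    evalL (refB (m + 1)) = evalL (refB m) * (Polynomial.X - Polynomial.C ((m : Int) + 1)) := by
  show evalL (List.zipWith (fun x y => x - ((m : Int) + 1) * y) (refB m ++ [0]) (0 :: refB m)) = _
  rw [evalL_zipWith_sub _ _ _ (by simp), evalL_concat, evalL_zero_cons]
  simp only [map_zero]
  ring

-- ---- coefficients and injectivity ----

lemma coeff_evalL_ge (l : List Int) : ∀ i : Nat, l.length ≤ i → (evalL l).coeff i = 0 := by
  induction l using List.reverseRecOn with
  | nil => intro i _; simp [evalL]
  | append_singleton t a ih =>
    intro i hi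
    simp only [List.length_append, List.length_singleton] at hi
    obtain ⟨j, rfl⟩ : ∃ j, i = j + 1 := ⟨i - 1, by omega⟩
    rw [evalL_concat, Polynomial.coeff_add, Polynomial.coeff_mul_X, Polynomial.coeff_C,
      if_neg (by omega), ih j (by omega), add_zero]

lemma coeff_evalL_top (l : List Int) : ∀ x : Int, (evalL (x :: l)).coeff l.length = x := by
  induction l using List.reverseRecOn with
  | nil => intro x; rw [show evalL [x] = evalL ([] ++ [x]) by rfl, evalL_concat]; simp [evalL]
  | append_singleton t a ih =>
    intro x
    rw [show x :: (t ++ [a]) = (x :: t) ++ [a] by rfl, evalL_concat]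
    simp only [List.length_append, List.length_cons, List.length_nil, Nat.zero_add]
    rw [Polynomial.coeff_add, Polynomial.coeff_mul_X, Polynomial.coeff_C,
      if_neg (by omega), ih x, add_zero]

lemma evalL_inj : ∀ (l1 l2 : List Int), l1.length = l2.length → evalL l1 = evalL l2 → l1 = l2 := by
  intro l1
  induction l1 using List.reverseRecOn with
  | nil =>
    intro l2 h _
    exact (List.eq_nil_of_length_eq_zero (by simpa using h.symm)).symm
  | append_singleton t1 a1 ih =>
    intro l2 h he
    cases l2 using List.reverseRecOn with
    | nil => simp at h
    | append_singleton t2 a2 =>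
      rw [evalL_concat, evalL_concat] at he
      have hlen : t1.length = t2.length := by simpa using h
      have ha : a1 = a2 := by
        have := congrArg (fun p => Polynomial.coeff p 0) he
        simpa [Polynomial.mul_coeff_zero, Polynomial.coeff_X_zero] using this
      subst ha
      have hx : evalL t1 * Polynomial.X = evalL t2 * Polynomial.X := by
        have := he
        simpa using this
      have ht : evalL t1 = evalL t2 := mul_right_cancel₀ Polynomial.X_ne_zero hx
      rw [ih t2 hlen ht]
-- ---- A's accumulation loop sums scaled basis polynomials ----

lemma A_loop_eval (cl : List Int) (bs : List (List Int)) : ∀ (K : Nat) (p0 : List Int),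
    evalL ((PySem.List.pyRange 0 (K : Int) 1).foldl
      (fun poly m =>
        if PySem.List.pyGetD cl m 0 = 0 then poly
        else polyAddInt poly ((PySem.List.pyGetD bs m []).map
          (fun coef => coef * PySem.List.pyGetD cl m 0))) p0)
    = evalL p0 + ∑ m ∈ Finset.range K,
        Polynomial.C (PySem.List.pyGetD cl (m : Int) 0) * evalL (PySem.List.pyGetD bs (m : Int) []) := by
  intro K
  induction K with
  | zero =>
    intro p0
    rw [PySem.List.pyRange_one_eq_nil (by norm_num)]
    simp
  | succ K ih =>
    intro p0
    push_cast
    rw [PySem.List.pyRange_one_succ_right (by positivity), List.foldl_append]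
    simp only [List.foldl_cons, List.foldl_nil]
    rw [Finset.sum_range_succ]
    by_cases h : PySem.List.pyGetD cl (K : Int) 0 = 0
    · rw [if_pos h, ih p0, h]
      simp
    · rw [if_neg h, evalL_polyAddInt, ih p0, evalL_map_mulc]
      ring

-- ---- B's first loop builds the c-list and the running factorial ----

lemma B_c_fold (b_list : List Int) : ∀ K : Nat,
    (PySem.List.pyRange 0 (K : Int) 1).foldl
      (fun (s : List Int × Int) m =>
        (s.1 ++ [PySem.Int.floordiv (PySem.List.pyGetD b_list m 0) s.2], s.2 * (m + 1)))
      ([], 1)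
    = ((List.range K).map
        (fun m => PySem.Int.floordiv (b_list.getD m 0) ((Nat.factorial m : Nat) : Int)),
       ((Nat.factorial K : Nat) : Int)) := by
  intro K
  induction K with
  | zero =>
    rw [PySem.List.pyRange_one_eq_nil (by norm_num)]
    simp [Nat.factorial]
  | succ K ih =>
    rw [show (((K + 1 : Nat)) : Int) = (K : Int) + 1 by push_cast; ring]
    rw [PySem.List.pyRange_one_succ_right (by positivity), List.foldl_append, ih]
    simp only [List.foldl_cons, List.foldl_nil]
    rw [List.range_succ, List.map_append]
    refine Prod.ext ?_ ?_
    · simp [PySem.List.pyGetD_natCast]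
    · simp only []
      push_cast [Nat.factorial_succ]
      ring

-- ---- setting the last element through Python's index -1 ----

lemma pySetD_concat_neg_one (ys : List Int) (z v : Int) :
    PySem.List.pySetD (ys ++ [z]) (-1) v = ys ++ [v] := by
  have hidx : PySem.List.pyIdx? (ys.length + 1) (-1) = some ys.length := by
    simp [PySem.List.pyIdx?]
  rw [PySem.List.pySetD, PySem.List.pySet?]
  simp only [List.length_append, List.length_cons, List.length_nil, Nat.zero_add, hidx,
    Option.map_some, Option.getD_some]
  rw [List.set_append_right _ _ (le_refl ys.length)]
  simp

-- ---- B's Horner loop ----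

lemma B_horner_fold (cB : List Int) : ∀ (K : Nat) (acc : List Int), acc ≠ [] →
    ((PySem.List.pyRange 0 (K : Int) 1).reverse.foldl
        (fun acc m =>
          PySem.List.pySetD (List.zipWith (fun x y => x - (m + 1) * y) (acc ++ [0]) (0 :: acc)) (-1)
            (PySem.List.pyGetD (List.zipWith (fun x y => x - (m + 1) * y) (acc ++ [0]) (0 :: acc)) (-1) 0 +
              PySem.List.pyGetD cB m 0))
        acc).length = acc.length + K
    ∧ evalL ((PySem.List.pyRange 0 (K : Int) 1).reverse.foldl
        (fun acc m =>
          PySem.List.pySetD (List.zipWith (fun x y => x - (m + 1) * y) (acc ++ [0]) (0 :: acc)) (-1)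
            (PySem.List.pyGetD (List.zipWith (fun x y => x - (m + 1) * y) (acc ++ [0]) (0 :: acc)) (-1) 0 +
              PySem.List.pyGetD cB m 0))
        acc)
      = evalL acc * evalL (refB K)
          + ∑ m ∈ Finset.range K,
              Polynomial.C (PySem.List.pyGetD cB (m : Int) 0) * evalL (refB m) := by
  intro K
  induction K with
  | zero =>
    intro acc hacc
    rw [PySem.List.pyRange_one_eq_nil (by norm_num)]
    refine ⟨rfl, ?_⟩
    rw [evalL_refB_zero]
    simp
  | succ K ih =>
    intro acc hacc
    rw [show (((K + 1 : Nat)) : Int) = (K : Int) + 1 by push_cast; ring]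
    rw [PySem.List.pyRange_one_succ_right (by positivity), List.reverse_append]
    simp only [List.reverse_singleton, List.singleton_append, List.foldl_cons]
    set acc1 : List Int :=
      List.zipWith (fun x y => x - ((K : Int) + 1) * y) (acc ++ [0]) (0 :: acc) with hacc1
    have hlen1 : acc1.length = acc.length + 1 := by
      rw [hacc1]; simp
    have heval1 : evalL acc1 = evalL acc * (Polynomial.X - Polynomial.C ((K : Int) + 1)) := by
      rw [hacc1, evalL_zipWith_sub _ _ _ (by simp), evalL_concat, evalL_zero_cons]
      simp only [map_zero]
      ring
    obtain ⟨ys, z, hyz⟩ : ∃ ys z, acc1 = ys ++ [z] := by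
      rcases List.eq_nil_or_concat acc1 with h | ⟨ys, z, h⟩
      · exfalso; rw [h] at hlen1; simp at hlen1
      · exact ⟨ys, z, by simpa [List.concat_eq_append] using h⟩
    set cK : Int := PySem.List.pyGetD cB (K : Int) 0 with hcK
    have hstep : PySem.List.pySetD acc1 (-1) (PySem.List.pyGetD acc1 (-1) 0 + cK)
        = ys ++ [z + cK] := by
      rw [hyz, PySem.List.pyGetD_neg_one_append_singleton, pySetD_concat_neg_one]
    have heval2 : evalL (ys ++ [z + cK]) = evalL acc1 + Polynomial.C cK := by
      rw [hyz, evalL_concat, evalL_concat]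
      simp only [map_add]
      ring
    have hne2 : ys ++ [z + cK] ≠ [] := by simp
    obtain ⟨hlen, heval⟩ := ih (ys ++ [z + cK]) hne2
    have h3 : (ys ++ [z + cK]).length = acc.length + 1 := by
      have h4 := hlen1
      rw [hyz] at h4
      simpa using h4
    rw [hstep]
    refine ⟨?_, ?_⟩
    · rw [hlen, h3]
      omega
    · rw [heval, heval2, heval1, Finset.sum_range_succ, evalL_refB_succ, ← hcK]
      ring
-- ---- the common target polynomial and the length of A's trimmed result ----

lemma P_coeff_top (N : Nat) (cv : Nat → Int) (hN : cv N = 1) :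
    (∑ m ∈ Finset.range (N + 1), Polynomial.C (cv m) * evalL (refB m)).coeff N = 1 := by
  rw [Polynomial.finset_sum_coeff]
  rw [Finset.sum_eq_single N]
  · obtain ⟨t, ht⟩ := refB_cons N
    have hlt : t.length = N := by
      have := refB_length N
      rw [ht] at this
      simpa using this
    rw [hN, ht, Polynomial.coeff_C_mul, ← hlt, coeff_evalL_top]
    simp
  · intro m hm hne
    have hmN : m < N := by
      have := Finset.mem_range.mp hm
      omega
    rw [Polynomial.coeff_C_mul, coeff_evalL_ge _ _ (by rw [refB_length]; omega), mul_zero]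
  · intro h
    exact absurd (Finset.self_mem_range_succ N) h

lemma P_coeff_gt (N : Nat) (cv : Nat → Int) :
    ∀ i : Nat, N < i →
    (∑ m ∈ Finset.range (N + 1), Polynomial.C (cv m) * evalL (refB m)).coeff i = 0 := by
  intro i hi
  rw [Polynomial.finset_sum_coeff]
  refine Finset.sum_eq_zero ?_
  intro m hm
  have hmN : m < N + 1 := Finset.mem_range.mp hm
  rw [Polynomial.coeff_C_mul, coeff_evalL_ge _ _ (by rw [refB_length]; omega), mul_zero]

lemma trim_len (pA : List Int) (N : Nat) (P : Polynomial ℤ)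
    (hev : evalL (polyTrim pA) = P)
    (htop : P.coeff N = 1) (hgt : ∀ i : Nat, N < i → P.coeff i = 0) :
    (polyTrim pA).length = N + 1 := by
  rcases polyTrim_shape pA with h | ⟨a, t, h, ha⟩
  · exfalso
    rw [h] at hev
    have h0 : evalL [0] = 0 := evalL_zero_cons []
    rw [h0] at hev
    rw [← hev] at htop
    simp at htop
  · rw [h] at hev ⊢
    have hat : (evalL (a :: t)).coeff t.length = a := coeff_evalL_top t a
    have h1 : ¬ N < t.length := by
      intro hlt
      rw [hev, hgt t.length hlt] at hat
      exact ha hat.symm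
    have h2 : ¬ t.length < N := by
      intro hlt
      have := coeff_evalL_ge (a :: t) N (by simp; omega)
      rw [hev, htop] at this
      simp at this
    simp
    omega
-- ---- main equivalence on a natural n ----

theorem both_eq (N : Nat) (b_list : List Int) :
    poly_from_forward_differences (N : Int) b_list = poly_from_forward_differences_alt (N : Int) b_list := by
  unfold poly_from_forward_differences poly_from_forward_differences_alt
  dsimp only
  rw [basisFold N, B_c_fold b_list N]
  dsimp only
  set cB : List Int := (List.range N).map
    (fun m => PySem.Int.floordiv (b_list.getD m 0) ((Nat.factorial m : Nat) : Int)) with hcB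
  set cl : List Int := PySem.List.pySetD ((PySem.List.pyRange 0 (N : Int) 1).foldl
    (fun c m => PySem.List.pySetD c m
      (PySem.Int.floordiv (PySem.List.pyGetD b_list m 0)
        (PySem.List.pyGetD ((PySem.List.pyRange 0 ((N : Int) + 1) 1).map (fun i => pyFactorial i)) m 0)))
    (List.replicate ((N : Int) + 1).toNat 0)) (N : Int) 1 with hcl
  set bs : List (List Int) := (List.range (N + 1)).map refB with hbs
  have hclv : ∀ k : Nat, k ≤ N → cl.getD k 0
      = if k < N then PySem.Int.floordiv (b_list.getD k 0) ((Nat.factorial k : Nat) : Int) else 1 := by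
    intro k hk
    rw [hcl]
    exact cl_spec b_list _ N (fun j hj => fact_getD N j hj) k hk
  have hcBv : ∀ m : Nat, m < N → cB.getD m 0
      = PySem.Int.floordiv (b_list.getD m 0) ((Nat.factorial m : Nat) : Int) := by
    intro m hm
    rw [hcB, List.getD, List.getElem?_map, List.getElem?_range hm]
    rfl
  have hbsv : ∀ m : Nat, m < N + 1 → bs.getD m [] = refB m := by
    intro m hm
    rw [hbs, List.getD, List.getElem?_map, List.getElem?_range hm]
    rfl
  set cv : Nat → Int := fun m =>
    if m < N then PySem.Int.floordiv (b_list.getD m 0) ((Nat.factorial m : Nat) : Int) else 1 with hcv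
  have hcvN : cv N = 1 := by rw [hcv]; simp
  set pA : List Int := (PySem.List.pyRange 0 ((N : Int) + 1) 1).foldl
    (fun poly m =>
      if PySem.List.pyGetD cl m 0 = 0 then poly
      else polyAddInt poly ((PySem.List.pyGetD bs m []).map
        (fun coef => coef * PySem.List.pyGetD cl m 0))) [0] with hpA
  have hA := A_loop_eval cl bs (N + 1) [0]
  push_cast at hA
  rw [← hpA] at hA
  have h00 : evalL [0] = 0 := (evalL_zero_cons []).trans rfl
  have hsum : evalL pA = ∑ m ∈ Finset.range (N + 1), Polynomial.C (cv m) * evalL (refB m) := by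
    rw [hA, h00, zero_add]
    refine Finset.sum_congr rfl ?_
    intro m hm
    have hmN : m < N + 1 := Finset.mem_range.mp hm
    rw [PySem.List.pyGetD_natCast, PySem.List.pyGetD_natCast, hclv m (by omega), hbsv m hmN, hcv]
  have hq : evalL (polyTrim pA) = ∑ m ∈ Finset.range (N + 1), Polynomial.C (cv m) * evalL (refB m) := by
    rw [evalL_trim]
    exact hsum
  have hqlen : (polyTrim pA).length = N + 1 :=
    trim_len pA N _ hq (P_coeff_top N cv hcvN) (P_coeff_gt N cv)
  set BOut : List Int := (PySem.List.pyRange 0 (N : Int) 1).reverse.foldl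
    (fun acc m =>
      PySem.List.pySetD (List.zipWith (fun x y => x - (m + 1) * y) (acc ++ [0]) (0 :: acc)) (-1)
        (PySem.List.pyGetD (List.zipWith (fun x y => x - (m + 1) * y) (acc ++ [0]) (0 :: acc)) (-1) 0 +
          PySem.List.pyGetD cB m 0))
    [1] with hBOut
  obtain ⟨hBlen, hBeval⟩ := B_horner_fold cB N [1] (by simp)
  rw [← hBOut] at hBlen hBeval
  have h11 : evalL [1] = 1 := evalL_refB_zero
  have hBsum : evalL BOut = ∑ m ∈ Finset.range (N + 1), Polynomial.C (cv m) * evalL (refB m) := by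
    rw [hBeval, h11, one_mul, Finset.sum_range_succ, hcvN]
    have hS : ∑ m ∈ Finset.range N, Polynomial.C (PySem.List.pyGetD cB (m : Int) 0) * evalL (refB m)
        = ∑ m ∈ Finset.range N, Polynomial.C (cv m) * evalL (refB m) := by
      refine Finset.sum_congr rfl ?_
      intro m hm
      have hmN : m < N := Finset.mem_range.mp hm
      rw [PySem.List.pyGetD_natCast, hcBv m hmN, hcv]
      simp [hmN]
    rw [hS, map_one]
    ring
  have hlen2 : (polyTrim pA).length = BOut.length := by
    rw [hqlen, hBlen]
    simp only [List.length_cons, List.length_nil]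
    omega
  have hcond : ¬ (((polyTrim pA).length : Int) < (N : Int) + 1) := by
    rw [hqlen]
    push_cast
    omega
  rw [if_neg hcond]
  exact evalL_inj _ _ hlen2 (hq.trans hBsum.symm)

-- ===== VERDICT (by name: the statement is the Claim_ definition above) =====
theorem poly_from_forward_differences_spec : Claim_equal_poly_from_forward_differences := by
  intro n b_list _hdom hpre
  unfold Spec_poly_from_forward_differences
  obtain ⟨h0, _hlen⟩ := hpre
  obtain ⟨N, rfl⟩ : ∃ N : Nat, n = (N : Int) := ⟨n.toNat, (Int.toNat_of_nonneg h0).symm⟩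
  exact (both_eq N b_list).symm ▸ rfl
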